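-- pv_equiv track=rewrite | github.com/tachyon-beep/hexcore | src/inference/chain_of_thought.py | _find_relevant_rules
-- ===== SOURCE A (Python) =====
-- from typing import Dict, Any, List, Optional, Tuple
--
-- def _find_relevant_rules(
--     text: str, rules_knowledge: List[Dict[str, Any]]
-- ) -> List[Dict[str, Any]]:
--     """Find rules relevant to the text."""
--     # Simplified implementation - would use semantic search or NLP in real system
--
--     if not rules_knowledge:
--         return []
--
--     # Extract key terms from text
--     # For simplicity, just using space-separated words
--     key_terms = [
--         word.strip().lower() for word in text.split() if len(word.strip()) > 3
--     ]
--
--     # Find rules that contain any of the key terms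
--     relevant_rules = []
--     for rule in rules_knowledge:
--         rule_text = rule.get("text", "").lower()
--         if any(term in rule_text for term in key_terms):
--             relevant_rules.append(rule)
--
--     return relevant_rules
-- ===== SOURCE B (Python) =====
-- from typing import Dict, Any, List
--
--
-- def _find_relevant_rules(
--     text: str, rules_knowledge: List[Dict[str, Any]]
-- ) -> List[Dict[str, Any]]:
--     """Find rules relevant to the text (term-outer sweep over precomputed texts)."""
--     key_terms = [
--         word.strip().lower() for word in text.split() if len(word.strip()) > 3
--     ]
--     texts = [rule.get("text", "").lower() for rule in rules_knowledge]
--     hit = [False] * len(texts)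
--     for term in key_terms:
--         hit = [h or (term in rt) for h, rt in zip(hit, texts)]
--     return [rule for rule, h in zip(rules_knowledge, hit) if h]
-- ===== Notes on version B (the rewrite author's own statement) =====
-- stated objective: alternative
-- what changed: B transposes the loops: it precomputes the lowered rule texts once, sweeps term-by-term over all rules maintaining a parallel hit-flag vector, and finally selects the flagged rules, instead of A's rule-outer loop that re-runs any() over the terms for each rule.
import Mathlib
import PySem

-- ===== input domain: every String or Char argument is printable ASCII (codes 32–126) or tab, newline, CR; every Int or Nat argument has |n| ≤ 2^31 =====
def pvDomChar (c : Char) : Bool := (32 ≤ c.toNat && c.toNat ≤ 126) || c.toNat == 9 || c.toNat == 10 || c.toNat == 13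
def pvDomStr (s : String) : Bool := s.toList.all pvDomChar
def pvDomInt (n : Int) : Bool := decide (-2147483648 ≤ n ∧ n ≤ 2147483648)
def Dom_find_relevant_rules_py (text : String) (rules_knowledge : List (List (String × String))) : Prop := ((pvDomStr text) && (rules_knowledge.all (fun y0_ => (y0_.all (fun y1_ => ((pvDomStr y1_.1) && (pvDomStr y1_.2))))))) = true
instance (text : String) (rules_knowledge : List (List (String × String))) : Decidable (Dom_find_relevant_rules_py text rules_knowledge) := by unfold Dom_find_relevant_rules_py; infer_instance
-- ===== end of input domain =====

-- ===== PORT A =====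
-- One honest line: B transposes the loops (term-outer sweep with a hit-flag vector) instead of A's rule-outer any(); alternative structure, no speed claim.
-- rule.get("text", "") on the assoc-list encoding of the dict (first match)
def pvGetText (rule : List (String × String)) : String :=
  match rule.find? (fun p => p.1 == "text") with
  | some p => p.2
  | none => ""

def pvKeyTerms (text : String) : List String :=
  ((PySem.Str.split₀ text).filter
      (fun word => 3 < PySem.Str.len (PySem.Str.strip word))).map
    (fun word => PySem.Str.lower (PySem.Str.strip word))

def find_relevant_rules_py (text : String) (rules_knowledge : List (List (String × String))) : List (List (String × String)) :=
  if rules_knowledge = [] then []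
  else
    let key_terms := pvKeyTerms text
    rules_knowledge.foldl
      (fun relevant_rules rule =>
        let rule_text := PySem.Str.lower (pvGetText rule)
        if key_terms.any (fun term => PySem.Str.isIn term rule_text) then
          relevant_rules ++ [rule]
        else relevant_rules) []

-- ===== PORT B =====
def find_relevant_rules_py_alt (text : String) (rules_knowledge : List (List (String × String))) : List (List (String × String)) :=
  let key_terms := pvKeyTerms text
  let texts := rules_knowledge.map (fun rule => PySem.Str.lower (pvGetText rule))
  let hit := key_terms.foldl
    (fun hit term => (hit.zip texts).map (fun p => p.1 || PySem.Str.isIn term p.2))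
    (List.replicate texts.length false)
  ((rules_knowledge.zip hit).filter (fun p => p.2)).map (fun p => p.1)

-- ===== PRECONDITION & SPEC =====
def Spec_find_relevant_rules_py (text : String) (rules_knowledge : List (List (String × String))) (out : List (List (String × String))) : Prop := out = find_relevant_rules_py_alt text rules_knowledge
instance (text : String) (rules_knowledge : List (List (String × String))) (out : List (List (String × String))) : Decidable (Spec_find_relevant_rules_py text rules_knowledge out) := by unfold Spec_find_relevant_rules_py; infer_instance

-- ===== CLAIM (what is proved, stated in full; the proofs are below) =====
def Claim_equal_find_relevant_rules_py : Prop := ∀ (text : String) (rules_knowledge : List (List (String × String))), Dom_find_relevant_rules_py text rules_knowledge → Spec_find_relevant_rules_py text rules_knowledge (find_relevant_rules_py text rules_knowledge)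

-- ===== LEMMAS AND PROOFS =====

-- the term-outer fold computes, at each position, 'h || any term hits'
theorem pv_zip_map (f : Bool → String → Bool) :
    ∀ (hit : List Bool) (texts : List String),
      (hit.zip texts).map (fun p => f p.1 p.2) = List.zipWith f hit texts := by
  intro hit
  induction hit with
  | nil => intro texts; rfl
  | cons h hs ih => intro texts; cases texts with
    | nil => rfl
    | cons t ts => simp [ih]

theorem pv_zipWith_fst :
    ∀ (hit : List Bool) (texts : List String), hit.length = texts.length →
      List.zipWith (fun h _ => h) hit texts = hit := by
  intro hit
  induction hit with
  | nil => intro texts _; rfl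
  | cons h hs ih => intro texts hl; cases texts with
    | nil => simp at hl
    | cons t ts => simp_all

theorem pv_zipWith_or (f g : String → Bool) :
    ∀ (hit : List Bool) (texts : List String),
      List.zipWith (fun h rt => h || g rt)
          (List.zipWith (fun h rt => h || f rt) hit texts) texts
        = List.zipWith (fun h rt => h || (f rt || g rt)) hit texts := by
  intro hit
  induction hit with
  | nil => intro texts; rfl
  | cons h hs ih => intro texts; cases texts with
    | nil => rfl
    | cons t ts => simp [ih, Bool.or_assoc]

theorem pv_fold_hit (terms : List String) (hit : List Bool) (texts : List String)
    (hl : hit.length = texts.length) :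
    terms.foldl (fun hit term => (hit.zip texts).map (fun p => p.1 || PySem.Str.isIn term p.2)) hit
      = List.zipWith (fun h rt => h || terms.any (fun t => PySem.Str.isIn t rt)) hit texts := by
  induction terms generalizing hit with
  | nil =>
      simp only [List.foldl_nil, List.any_nil, Bool.or_false]
      exact (pv_zipWith_fst hit texts hl).symm
  | cons t ts ih =>
      simp only [List.foldl_cons]
      rw [pv_zip_map (fun h rt => h || PySem.Str.isIn t rt),
        ih _ (by simp [List.length_zipWith, hl]),
        pv_zipWith_or (fun rt => PySem.Str.isIn t rt) (fun rt => ts.any (fun u => PySem.Str.isIn u rt))]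
      simp

theorem pv_select_map (rules : List (List (String × String))) (f : List (String × String) → Bool) :
    ((rules.zip (rules.map f)).filter (fun p => p.2)).map (fun p => p.1) = rules.filter f := by
  induction rules with
  | nil => rfl
  | cons r rs ih => by_cases h : f r <;> simp [h, ih]

-- ===== VERDICT (by name: the statement is the Claim_ definition above) =====
theorem pv_replicate_zipWith (f : Bool → String → Bool) (texts : List String) :
    List.zipWith f (List.replicate texts.length false) texts = texts.map (f false) := by
  induction texts with
  | nil => rfl
  | cons t ts ih => simp [List.replicate_succ, ih]

theorem find_relevant_rules_py_spec : Claim_equal_find_relevant_rules_py := by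
  intro text rules _
  unfold Spec_find_relevant_rules_py find_relevant_rules_py find_relevant_rules_py_alt
  simp only
  rw [pv_fold_hit _ _ _ (by simp)]
  rw [pv_replicate_zipWith]
  rw [List.map_map]
  simp only [Function.comp_def, Bool.false_or]
  rw [pv_select_map rules
    (fun rule => (pvKeyTerms text).any (fun t => PySem.Str.isIn t (PySem.Str.lower (pvGetText rule))))]
  split_ifs with h
  · simp [h]
  · rw [PySem.List.foldl_append_if_eq_filter]
    simp
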